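-- pv_equiv track=rewrite | github.com/simonw/tools | python/asus_status.py | _resolve_node_name
-- ===== SOURCE A (Python) =====
-- def _resolve_node_name(nodes, mac):
--     """Resolve a MAC to a node alias. Checks primary MAC and all radio MACs."""
--     for n in nodes:
--         if n["mac"] == mac:
--             return n["alias"]
--         # Check radio-specific MACs (ap2g, ap5g, ap5g1, apdwb, sta2g, sta5g)
--         for key in ("ap2g", "ap5g", "ap5g1", "apdwb", "ap6g", "sta2g", "sta5g", "sta6g",
--                      "ap2g_fh", "ap5g_fh", "ap5g1_fh"):
--             if n.get(key) == mac:
--                 return n["alias"]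
--     return mac
-- ===== SOURCE B (Python) =====
-- _RADIO_KEYS = ("ap2g", "ap5g", "ap5g1", "apdwb", "ap6g", "sta2g", "sta5g", "sta6g",
--                "ap2g_fh", "ap5g_fh", "ap5g1_fh")
--
--
-- def _resolve_node_name(nodes, mac):
--     """Resolve a MAC to a node alias via a first-wins index built in one pass."""
--     index = {}
--     for n in nodes:
--         index.setdefault(n["mac"], n)
--         for key in _RADIO_KEYS:
--             index.setdefault(n.get(key), n)
--     node = index.get(mac)
--     return node["alias"] if node is not None else mac
-- ===== Notes on version B (the rewrite author's own statement) =====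
-- stated objective: alternative
-- what changed: Replaces the nested linear scan (per-node loop over radio keys with early return) by building a first-wins MAC-to-node dict index in one pass and doing a single hash lookup afterwards.
-- outside the precondition, e.g. on _resolve_node_name([{'mac': 'x', 'alias': 'N'}, {'alias': 'M'}], 'x'): A returns 'N', B raises KeyError
import Mathlib
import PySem

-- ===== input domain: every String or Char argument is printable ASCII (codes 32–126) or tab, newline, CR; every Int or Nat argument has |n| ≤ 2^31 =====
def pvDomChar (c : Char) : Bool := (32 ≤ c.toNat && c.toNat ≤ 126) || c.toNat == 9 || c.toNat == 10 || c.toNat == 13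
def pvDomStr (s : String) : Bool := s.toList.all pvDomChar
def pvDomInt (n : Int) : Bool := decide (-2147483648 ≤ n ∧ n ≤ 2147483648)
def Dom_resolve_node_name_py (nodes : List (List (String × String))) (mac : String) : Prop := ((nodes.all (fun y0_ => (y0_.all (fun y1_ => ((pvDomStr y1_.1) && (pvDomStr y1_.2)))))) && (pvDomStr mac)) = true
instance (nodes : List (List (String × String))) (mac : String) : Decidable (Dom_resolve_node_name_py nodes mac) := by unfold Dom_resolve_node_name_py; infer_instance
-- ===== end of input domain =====

-- B replaces A's nested linear scan by a one-pass first-wins dict index plus a single lookup (alternative decomposition, same cost for one query).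

-- the fixed tuple of radio-specific keys from A (B uses the same tuple)
def pvRadioKeys : List String := ["ap2g", "ap5g", "ap5g1", "apdwb", "ap6g", "sta2g", "sta5g", "sta6g",
                                  "ap2g_fh", "ap5g_fh", "ap5g1_fh"]

-- ===== PORT A =====
-- linear scan: first node whose "mac" or some radio key equals mac; n["alias"]/n["mac"] KeyErrors are excluded by Pre_
def pvScanA (mac : String) : List (List (String × String)) → String
  | [] => mac
  | n :: rest =>
    let dn := PySem.Dict.ofList n
    if dn.get? "mac" == some mac then (dn.get? "alias").getD ""       -- n["alias"] (present under Pre_)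
    else if pvRadioKeys.any (fun k => dn.get? k == some mac) then (dn.get? "alias").getD ""
    else pvScanA mac rest

def resolve_node_name_py (nodes : List (List (String × String))) (mac : String) : String :=
  pvScanA mac nodes

-- ===== PORT B =====
-- index.setdefault(n["mac"], n); for key in _RADIO_KEYS: index.setdefault(n.get(key), n)
-- Python's None / n.get(key) keys become Option String keys (n["mac"] missing raises in Python; excluded by Pre_)
def pvStepB (d : PySem.Dict (Option String) (PySem.Dict String String)) (n : List (String × String)) :
    PySem.Dict (Option String) (PySem.Dict String String) :=
  let dn := PySem.Dict.ofList n
  pvRadioKeys.foldl (fun d k => d.setdefault (dn.get? k) dn) (d.setdefault (dn.get? "mac") dn)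

def resolve_node_name_py_alt (nodes : List (List (String × String))) (mac : String) : String :=
  let index := nodes.foldl pvStepB PySem.Dict.empty
  match index.get? (some mac) with
  | some node => (node.get? "alias").getD ""       -- node["alias"] (present under Pre_)
  | none => mac

-- ===== PRECONDITION & SPEC =====
-- helper for Pre_: does this node match mac (primary MAC or any radio key)?
def pvMatch (mac : String) (n : List (String × String)) : Bool :=
  ((PySem.Dict.ofList n).get? "mac" == some mac) ||
    pvRadioKeys.any (fun k => (PySem.Dict.ofList n).get? k == some mac)

-- Pre_ excludes the inputs where Python raises KeyError: a node without a "mac" key (A raises at it only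
-- when scanned before a match, B always; the few inputs where A still returns but B raises are cited in the claim),
-- and a first matching node without an "alias" key (both raise there).
def Pre_resolve_node_name_py (nodes : List (List (String × String))) (mac : String) : Prop :=
  (∀ n ∈ nodes, ((PySem.Dict.ofList n).get? "mac").isSome = true) ∧
  (∀ n ∈ nodes, nodes.find? (pvMatch mac) = some n → ((PySem.Dict.ofList n).get? "alias").isSome = true)
instance (nodes : List (List (String × String))) (mac : String) : Decidable (Pre_resolve_node_name_py nodes mac) := by unfold Pre_resolve_node_name_py; infer_instance

def pvWitness_resolve_node_name_py : (List (List (String × String))) × String :=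
  ([[("mac", "aa:bb"), ("alias", "router")], [("mac", "cc:dd"), ("alias", "node2"), ("ap5g", "ee:ff")]], "ee:ff")

def Spec_resolve_node_name_py (nodes : List (List (String × String))) (mac : String) (out : String) : Prop := out = resolve_node_name_py_alt nodes mac
instance (nodes : List (List (String × String))) (mac : String) (out : String) : Decidable (Spec_resolve_node_name_py nodes mac out) := by unfold Spec_resolve_node_name_py; infer_instance

-- ===== CLAIM (what is proved, stated in full; the proofs are below) =====
def Claim_equal_resolve_node_name_py : Prop := ∀ (nodes : List (List (String × String))) (mac : String), Dom_resolve_node_name_py nodes mac → Pre_resolve_node_name_py nodes mac → Spec_resolve_node_name_py nodes mac (resolve_node_name_py nodes mac)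

-- ===== LEMMAS AND PROOFS =====

-- setdefault never disturbs an existing binding
theorem pv_get?_setdefault_of_some {κ ν : Type} [BEq κ] [LawfulBEq κ] (d : PySem.Dict κ ν)
    (k j : κ) (w v : ν) (h : d.get? j = some v) : (d.setdefault k w).get? j = some v := by
  by_cases hc : d.contains k = true
  · rw [PySem.Dict.setdefault_of_contains d w hc]; exact h
  · rw [PySem.Dict.setdefault_of_not_contains d w (by simpa using hc)]
    have hj : j ≠ k := by
      intro he; subst he
      rw [PySem.Dict.contains_eq_isSome_get?, h] at hc; simp at hc
    rw [PySem.Dict.get?_insert_of_ne d w hj]; exact h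

-- setdefault at a different key leaves the lookup unchanged
theorem pv_get?_setdefault_of_ne {κ ν : Type} [BEq κ] [LawfulBEq κ] (d : PySem.Dict κ ν)
    (k j : κ) (w : ν) (h : j ≠ k) : (d.setdefault k w).get? j = d.get? j := by
  by_cases hc : d.contains k = true
  · rw [PySem.Dict.setdefault_of_contains d w hc]
  · rw [PySem.Dict.setdefault_of_not_contains d w (by simpa using hc)]
    exact PySem.Dict.get?_insert_of_ne d w h

-- the radio-key setdefault loop preserves an existing binding
theorem pv_foldl_sd_preserve (ks : List String) (dn : PySem.Dict String String)
    (d : PySem.Dict (Option String) (PySem.Dict String String)) (j : Option String)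
    (v : PySem.Dict String String) (h : d.get? j = some v) :
    (ks.foldl (fun d k => d.setdefault (dn.get? k) dn) d).get? j = some v := by
  induction ks generalizing d with
  | nil => exact h
  | cons k ks ih => exact ih _ (pv_get?_setdefault_of_some d _ j dn v h)

theorem pv_stepB_preserve (n : List (String × String))
    (d : PySem.Dict (Option String) (PySem.Dict String String)) (j : Option String)
    (v : PySem.Dict String String) (h : d.get? j = some v) :
    (pvStepB d n).get? j = some v := by
  unfold pvStepB
  exact pv_foldl_sd_preserve _ _ _ _ _ (pv_get?_setdefault_of_some d _ j _ v h)

theorem pv_build_preserve (nodes : List (List (String × String)))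
    (d : PySem.Dict (Option String) (PySem.Dict String String)) (j : Option String)
    (v : PySem.Dict String String) (h : d.get? j = some v) :
    (nodes.foldl pvStepB d).get? j = some v := by
  induction nodes generalizing d with
  | nil => exact h
  | cons n ns ih =>
    rw [List.foldl_cons]
    exact ih _ (pv_stepB_preserve n d j v h)

-- the radio-key loop from an unbound state: binds dn iff some radio key carries mac
theorem pv_foldl_sd_none (mac : String) (ks : List String) (dn : PySem.Dict String String)
    (d : PySem.Dict (Option String) (PySem.Dict String String)) (h : d.get? (some mac) = none) :
    (ks.foldl (fun d k => d.setdefault (dn.get? k) dn) d).get? (some mac)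
      = if ks.any (fun k => dn.get? k == some mac) then some dn else none := by
  induction ks generalizing d with
  | nil => rw [List.foldl_nil, List.any_nil]; simpa using h
  | cons k ks ih =>
    rw [List.foldl_cons, List.any_cons]
    by_cases hk : dn.get? k = some mac
    · have h1 : (d.setdefault (dn.get? k) dn).get? (some mac) = some dn := by
        rw [hk]
        have hc : d.contains (some mac) = false := by
          rw [PySem.Dict.contains_eq_isSome_get?, h]; rfl
        rw [PySem.Dict.setdefault_of_not_contains d dn hc]
        exact PySem.Dict.get?_insert_self d _ dn
      rw [pv_foldl_sd_preserve ks dn _ _ dn h1]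
      simp [hk]
    · have h1 : (d.setdefault (dn.get? k) dn).get? (some mac) = none := by
        rw [pv_get?_setdefault_of_ne d _ _ dn (fun he => hk he.symm)]; exact h
      rw [ih _ h1]
      simp [hk]

-- one build step from an unbound state: binds the node's dict iff the node matches
theorem pv_stepB_none (mac : String) (n : List (String × String))
    (d : PySem.Dict (Option String) (PySem.Dict String String)) (h : d.get? (some mac) = none) :
    (pvStepB d n).get? (some mac)
      = if pvMatch mac n then some (PySem.Dict.ofList n) else none := by
  unfold pvStepB pvMatch
  by_cases hm : (PySem.Dict.ofList n).get? "mac" = some mac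
  · have h1 : (d.setdefault ((PySem.Dict.ofList n).get? "mac") (PySem.Dict.ofList n)).get? (some mac)
        = some (PySem.Dict.ofList n) := by
      rw [hm]
      have hc : d.contains (some mac) = false := by
        rw [PySem.Dict.contains_eq_isSome_get?, h]; rfl
      rw [PySem.Dict.setdefault_of_not_contains d _ hc]
      exact PySem.Dict.get?_insert_self d _ _
    rw [pv_foldl_sd_preserve pvRadioKeys _ _ _ _ h1]
    simp [hm]
  · have h1 : (d.setdefault ((PySem.Dict.ofList n).get? "mac") (PySem.Dict.ofList n)).get? (some mac) = none := by
      rw [pv_get?_setdefault_of_ne d _ _ _ (fun he => hm he.symm)]; exact h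
    rw [pv_foldl_sd_none mac pvRadioKeys _ _ h1]
    simp [hm]

-- the full build from an unbound state computes the first matching node
theorem pv_build_eq_find (mac : String) (nodes : List (List (String × String)))
    (d : PySem.Dict (Option String) (PySem.Dict String String)) (h : d.get? (some mac) = none) :
    (nodes.foldl pvStepB d).get? (some mac)
      = (nodes.find? (pvMatch mac)).map PySem.Dict.ofList := by
  induction nodes generalizing d with
  | nil => simpa using h
  | cons n ns ih =>
    simp only [List.foldl_cons, List.find?_cons]
    by_cases hm : pvMatch mac n = true
    · rw [pv_build_preserve ns _ (some mac) (PySem.Dict.ofList n) (by rw [pv_stepB_none mac n d h]; simp [hm])]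
      simp [hm]
    · rw [ih _ (by rw [pv_stepB_none mac n d h]; simp [hm])]
      simp [hm]

-- A's scan also computes the first matching node's alias
theorem pv_scanA_eq_find (mac : String) (nodes : List (List (String × String))) :
    pvScanA mac nodes
      = match (nodes.find? (pvMatch mac)).map PySem.Dict.ofList with
        | some node => (node.get? "alias").getD ""
        | none => mac := by
  induction nodes with
  | nil => simp [pvScanA]
  | cons n ns ih =>
    rw [pvScanA, List.find?_cons]
    by_cases h1 : (PySem.Dict.ofList n).get? "mac" == some mac
    · simp [h1, pvMatch]
    · by_cases h2 : pvRadioKeys.any (fun k => (PySem.Dict.ofList n).get? k == some mac)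
      · simp [h1, h2, pvMatch]
      · simp only [h1, h2, if_neg, Bool.false_eq_true, not_false_eq_true]
        rw [ih]
        have hm : pvMatch mac n = false := by
          unfold pvMatch
          simp only [Bool.or_eq_false_iff]
          constructor
          · simpa using h1
          · simpa using h2
        simp [hm]

-- ===== VERDICT (by name: the statement is the Claim_ definition above) =====
theorem resolve_node_name_py_spec : Claim_equal_resolve_node_name_py := by
  intro nodes mac _ _
  show resolve_node_name_py nodes mac = resolve_node_name_py_alt nodes mac
  unfold resolve_node_name_py resolve_node_name_py_alt
  simp only []
  rw [pv_scanA_eq_find, pv_build_eq_find mac nodes PySem.Dict.empty (PySem.Dict.get?_empty _)]
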